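-- pv_equiv track=rewrite | github.com/ceus90/CS224N-TheEfficiencyThreshold | tests/test_splits.py | make_fake_examples
-- ===== SOURCE A (Python) =====
-- def make_fake_examples(nA=50, nB=30, nC=20):
--     """Create standardized examples with labels A/B/C."""
--     examples = []
--     idx = 0
--     for _ in range(nA):
--         examples.append({"id": f"ex_{idx}", "x": f"x{idx}", "y": "A", "label": "A"})
--         idx += 1
--     for _ in range(nB):
--         examples.append({"id": f"ex_{idx}", "x": f"x{idx}", "y": "B", "label": "B"})
--         idx += 1
--     for _ in range(nC):
--         examples.append({"id": f"ex_{idx}", "x": f"x{idx}", "y": "C", "label": "C"})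
--         idx += 1
--     return examples
-- ===== SOURCE B (Python) =====
-- def make_fake_examples(nA=50, nB=30, nC=20):
--     """Create standardized examples with labels A/B/C."""
--     # arithmetical formulation: total length up front, label of index i in closed
--     # form by threshold comparisons (block [0,a) -> "A", [a,ab) -> "B", rest -> "C")
--     a = max(nA, 0)
--     ab = a + max(nB, 0)
--     n = ab + max(nC, 0)
--     return [{"id": f"ex_{i}", "x": f"x{i}",
--              "y": "A" if i < a else "B" if i < ab else "C",
--              "label": "A" if i < a else "B" if i < ab else "C"}
--             for i in range(n)]
-- ===== Notes on version B (the rewrite author's own statement) =====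
-- stated objective: alternative
-- what changed: Replaces A's three appending loops with a manual counter by an arithmetical formulation: the total length is computed up front and each example's label is derived from its index in closed form by threshold comparisons, in one comprehension over range(n).
import Mathlib
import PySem

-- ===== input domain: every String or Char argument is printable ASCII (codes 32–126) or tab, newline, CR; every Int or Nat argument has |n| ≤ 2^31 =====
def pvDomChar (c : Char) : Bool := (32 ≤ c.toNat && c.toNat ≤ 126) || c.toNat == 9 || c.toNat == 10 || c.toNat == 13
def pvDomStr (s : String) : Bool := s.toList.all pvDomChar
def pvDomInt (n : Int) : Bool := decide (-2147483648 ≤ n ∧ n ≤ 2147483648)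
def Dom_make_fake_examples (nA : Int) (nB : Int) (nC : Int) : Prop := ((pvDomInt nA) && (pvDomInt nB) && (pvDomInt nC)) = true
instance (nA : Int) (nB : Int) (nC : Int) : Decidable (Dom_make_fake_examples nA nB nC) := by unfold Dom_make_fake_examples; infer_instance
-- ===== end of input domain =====

-- B computes the total length up front and derives each example's label from its
-- index in closed form (threshold comparisons), in one pass over range(n),
-- instead of A's three appending loops with a manual counter (objective: alternative).

-- ===== PORT A =====
-- the dict literal {"id": …, "x": …, "y": lab, "label": lab} as an association list
def pvEntry (idx : Int) (lab : String) : List (String × String) :=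
  [("id", "ex_" ++ PySem.Int.toStr idx), ("x", "x" ++ PySem.Int.toStr idx),
   ("y", lab), ("label", lab)]

def make_fake_examples (nA : Int) (nB : Int) (nC : Int) : List (List (String × String)) :=
  -- examples = []; idx = 0; three 'for _ in range(n)' loops appending and incrementing idx
  let st0 : List (List (String × String)) × Int := ([], 0)
  let st1 := (PySem.List.pyRange 0 nA 1).foldl
    (fun p _ => (p.1 ++ [pvEntry p.2 "A"], p.2 + 1)) st0
  let st2 := (PySem.List.pyRange 0 nB 1).foldl
    (fun p _ => (p.1 ++ [pvEntry p.2 "B"], p.2 + 1)) st1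
  let st3 := (PySem.List.pyRange 0 nC 1).foldl
    (fun p _ => (p.1 ++ [pvEntry p.2 "C"], p.2 + 1)) st2
  st3.1

-- ===== PORT B =====
-- _label(i, a, ab): closed-form label of index i
def pvLabel (i a ab : Int) : String := if i < a then "A" else if i < ab then "B" else "C"

def make_fake_examples_alt (nA : Int) (nB : Int) (nC : Int) : List (List (String × String)) :=
  let a := max nA 0
  let ab := a + max nB 0
  let n := ab + max nC 0
  (PySem.List.pyRange 0 n 1).map (fun i =>
    [("id", "ex_" ++ PySem.Int.toStr i), ("x", "x" ++ PySem.Int.toStr i),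
     ("y", pvLabel i a ab), ("label", pvLabel i a ab)])

-- ===== PRECONDITION & SPEC =====
def Spec_make_fake_examples (nA : Int) (nB : Int) (nC : Int) (out : List (List (String × String))) : Prop := out = make_fake_examples_alt nA nB nC
instance (nA : Int) (nB : Int) (nC : Int) (out : List (List (String × String))) : Decidable (Spec_make_fake_examples nA nB nC out) := by unfold Spec_make_fake_examples; infer_instance

-- ===== CLAIM (what is proved, stated in full; the proofs are below) =====
def Claim_equal_make_fake_examples : Prop := ∀ (nA : Int) (nB : Int) (nC : Int), Dom_make_fake_examples nA nB nC → Spec_make_fake_examples nA nB nC (make_fake_examples nA nB nC)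

-- ===== LEMMAS AND PROOFS =====
-- B's dict literal is pvEntry with the closed-form label (definitional)
lemma altB_eq (nA nB nC : Int) :
    make_fake_examples_alt nA nB nC
      = (PySem.List.pyRange 0 (max nA 0 + max nB 0 + max nC 0) 1).map
          (fun i => pvEntry i (pvLabel i (max nA 0) (max nA 0 + max nB 0))) := rfl

-- one counter-loop of A, over any dummy list, appends one pvEntry per element at
-- consecutive indices: it equals mapping pvEntry over the index range it traverses
lemma foldA_block (l : List Int) (lab : String) (acc : List (List (String × String))) (idx : Int) :
    l.foldl (fun p _ => (p.1 ++ [pvEntry p.2 lab], p.2 + 1)) (acc, idx)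
      = (acc ++ (PySem.List.pyRange idx (idx + l.length) 1).map (fun i => pvEntry i lab),
         idx + l.length) := by
  induction l generalizing acc idx with
  | nil => simp [PySem.List.pyRange_one_eq_nil (le_refl idx)]
  | cons x xs ih =>
      rw [List.foldl_cons, ih]
      have hcons : PySem.List.pyRange idx (idx + (x :: xs).length) 1
          = idx :: PySem.List.pyRange (idx + 1) (idx + (x :: xs).length) 1 := by
        apply PySem.List.pyRange_one_cons
        simp only [List.length_cons]
        push_cast; omega
      rw [hcons]
      simp only [List.map_cons, List.length_cons]
      rw [Prod.mk.injEq]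
      constructor
      · simp only [List.append_assoc, List.singleton_append]
        congr 2
        push_cast; ring_nf
      · push_cast; ring

-- on its own block's index range, pvLabel returns that block's label
lemma map_label_const (lo hi a ab : Int) (lab : String)
    (h : ∀ i : Int, lo ≤ i → i < hi → pvLabel i a ab = lab) :
    (PySem.List.pyRange lo hi 1).map (fun i => pvEntry i (pvLabel i a ab))
      = (PySem.List.pyRange lo hi 1).map (fun i => pvEntry i lab) := by
  apply List.map_congr_left
  intro i hi'
  rw [PySem.List.mem_pyRange_one] at hi'
  rw [h i hi'.1 hi'.2]

theorem make_fake_examples_spec : Claim_equal_make_fake_examples := by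
  intro nA nB nC _
  show make_fake_examples nA nB nC = make_fake_examples_alt nA nB nC
  rw [altB_eq]
  simp only [make_fake_examples, foldA_block, PySem.List.length_pyRange_one]
  -- abbreviate the block boundaries
  set a : Int := max nA 0 with ha
  set ab : Int := a + max nB 0 with hab
  set n : Int := ab + max nC 0 with hn
  have h1 : (0 : Int) + ((nA - 0).toNat : Int) = a := by omega
  have h2 : a + ((nB - 0).toNat : Int) = ab := by omega
  have h3 : ab + ((nC - 0).toNat : Int) = n := by omega
  rw [h1]
  rw [h2]
  rw [h3]
  have split1 : PySem.List.pyRange 0 n 1 = PySem.List.pyRange 0 a 1 ++ PySem.List.pyRange a n 1 :=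
    PySem.List.pyRange_one_append 0 a n (by omega) (by omega)
  have split2 : PySem.List.pyRange a n 1 = PySem.List.pyRange a ab 1 ++ PySem.List.pyRange ab n 1 :=
    PySem.List.pyRange_one_append a ab n (by omega) (by omega)
  rw [split1, split2, List.map_append, List.map_append]
  rw [map_label_const 0 a a ab "A"
    (by intro i hlo hhi; unfold pvLabel; rw [if_pos hhi])]
  rw [map_label_const a ab a ab "B"
    (by intro i hlo hhi; unfold pvLabel; rw [if_neg (by omega), if_pos hhi])]
  rw [map_label_const ab n a ab "C"
    (by intro i hlo hhi; unfold pvLabel; rw [if_neg (by omega), if_neg (by omega)])]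
  simp
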